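/- GENERATED by farm/mkstatement.py from design/units.tsv (unit `DGifDecompressInput.1`) and the assertions of Gif/Spec/Seg_DGifDecompressInput.lean — do not edit.
   THE STATEMENT of the proof unit `DGifDecompressInput.1`: segment 1 of `DGifDecompressInput` (11 instructions; entries 0x1067eb;
   exits 0x106807,0x106874; ranges 0x1067eb-0x106807,0x10685e-0x106874)
   takes each of its entry assertions to one of its exit assertions (`Gif.Spec.DGifDecompressInput.Seg1`), given the contracts of its callees.
   What the names mean: ProgX/Base/Spec/Basic.lean (the shared hypotheses), Gif/Spec/Seg_DGifDecompressInput.lean (the assertions). The theorem to prove: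
   `theorem DGifDecompressInput_1_ok : Gif.Spec.DGifDecompressInput_1.Statement`. -/
import Gif.Code
import Gif.Dec.All
import Gif.Labels
import Gif.Spec.Seg_DGifDecompressInput
namespace Gif.Spec.DGifDecompressInput_1
open X86 X86.User Asan

/-- The statement of unit `DGifDecompressInput.1`. -/
def Statement : Prop :=
  ∀ (Lay : Layout) (_hLay : Lay.hi = 0x1000000) (μ : Microarch) (_hμ : UserX.MicroOK μ) (u₀ : State)
    (_hcode : HasCodeNat Lay u₀ Gif.L.DGifDecompressInput.entry Gif.Code.code_DGifDecompressInput.nat Gif.L.DGifDecompressInput.size)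
    (_h_asan_load8_noabort : Asan.SmallCheck Lay μ ProgX.Base.WayInv (ProgX.Base.CodeOK u₀) [.rax, .rcx, .rdx] 8 ProgX.Base.L.__asan_load8_noabort.entry)
    (_h_asan_load4_noabort : Asan.SmallCheck Lay μ ProgX.Base.WayInv (ProgX.Base.CodeOK u₀) [.rax, .rcx, .rdx] 4 ProgX.Base.L.__asan_load4_noabort.entry)
    (_h_asan_store4_noabort : Asan.SmallCheck Lay μ ProgX.Base.WayInv (ProgX.Base.CodeOK u₀) [.rax, .rcx, .rdx] 4 ProgX.Base.L.__asan_store4_noabort.entry),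
    Gif.Spec.DGifDecompressInput.Seg1 Lay μ u₀

end Gif.Spec.DGifDecompressInput_1
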